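-- pv_equiv track=rewrite | github.com/MikeMtz9507/MCC-2025-03 | TécnicasCienciasComputacionales/Temperatura Ejercicio/Temperatura.py | separar_por_dias
-- ===== SOURCE A (Python) =====
-- def separar_por_dias(datos):
--     dias = []
--     dia_actual = []
--     hora_anterior = datos[0]["hora"]
--
--     for fila in datos:
--         if fila["hora"] < hora_anterior:  # cambio de día
--             dias.append(dia_actual)
--             dia_actual = []
--         dia_actual.append(fila)
--         hora_anterior = fila["hora"]
--
--     if dia_actual:
--         dias.append(dia_actual)
--
--     return dias
-- ===== SOURCE B (Python) =====
-- def separar_por_dias(datos):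
--     dias = []
--     for fila in reversed(datos):
--         if dias and fila["hora"] <= dias[0][0]["hora"]:
--             dias[0].insert(0, fila)
--         else:
--             dias.insert(0, [fila])
--     return dias
-- ===== Notes on version B (the rewrite author's own statement) =====
-- stated objective: alternative
-- what changed: B builds the partition right-to-left: scanning the rows in reverse it prepends each row into the first (earliest) day while the hour does not decrease towards the next row, instead of A's forward scan carrying dias/dia_actual/hora_anterior state with a final flush.
import Mathlib
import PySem

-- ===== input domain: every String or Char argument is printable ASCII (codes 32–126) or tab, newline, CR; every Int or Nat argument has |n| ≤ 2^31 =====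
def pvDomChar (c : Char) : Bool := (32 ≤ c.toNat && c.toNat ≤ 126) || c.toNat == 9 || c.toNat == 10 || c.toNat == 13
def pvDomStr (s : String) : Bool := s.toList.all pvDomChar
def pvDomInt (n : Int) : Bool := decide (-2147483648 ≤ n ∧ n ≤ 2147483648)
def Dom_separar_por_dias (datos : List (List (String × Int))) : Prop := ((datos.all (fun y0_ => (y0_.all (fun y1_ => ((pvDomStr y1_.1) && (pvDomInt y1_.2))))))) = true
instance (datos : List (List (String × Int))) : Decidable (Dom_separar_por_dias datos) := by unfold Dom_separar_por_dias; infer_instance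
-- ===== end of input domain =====

-- B changes the decomposition: it builds the partition right-to-left by prepending each row
-- into the first day (or opening a new one), with no dias/dia_actual/hora_anterior state.

-- ===== PORT A =====
-- fila["hora"] (first-match dict lookup); the .getD 0 default is never used under Pre_ (key present)
def pvHora (fila : List (String × Int)) : Int := ((PySem.Dict.mk fila).get? "hora").getD 0

-- one iteration of A's for-loop over the state (dias, dia_actual, hora_anterior)
def pvStepA (st : List (List (List (String × Int))) × List (List (String × Int)) × Int)
    (fila : List (String × Int)) :
    List (List (List (String × Int))) × List (List (String × Int)) × Int :=
  if pvHora fila < st.2.2 then (st.1 ++ [st.2.1], [fila], pvHora fila)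
  else (st.1, st.2.1 ++ [fila], pvHora fila)

def separar_por_dias (datos : List (List (String × Int))) : List (List (List (String × Int))) :=
  -- hora_anterior = datos[0]["hora"]: the .getD [] default is only reached when datos = [],
  -- where Python raises IndexError (excluded by Pre_)
  let hora_anterior := pvHora ((PySem.List.pyGet? datos 0).getD [])
  let st := datos.foldl pvStepA ([], [], hora_anterior)
  if st.2.1 = [] then st.1 else st.1 ++ [st.2.1]

-- ===== PORT B =====
-- one iteration of B's loop over reversed(datos); dias[0][0] via pyGet?, groups are never empty
def pvStepB (dias : List (List (List (String × Int)))) (fila : List (String × Int)) :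
    List (List (List (String × Int))) :=
  match dias with
  | g :: rest =>
      if pvHora fila ≤ pvHora ((PySem.List.pyGet? g 0).getD []) then (fila :: g) :: rest
      else [fila] :: g :: rest
  | [] => [[fila]]

def separar_por_dias_alt (datos : List (List (String × Int))) : List (List (List (String × Int))) :=
  datos.reverse.foldl pvStepB []

-- ===== PRECONDITION & SPEC =====
-- Pre_ excludes exactly the inputs where the Python A raises: the empty list (IndexError on
-- datos[0]) and rows without the key "hora" (KeyError).
def Pre_separar_por_dias (datos : List (List (String × Int))) : Prop :=
  datos ≠ [] ∧ ∀ fila ∈ datos, ((PySem.Dict.mk fila).get? "hora").isSome = true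
instance (datos : List (List (String × Int))) : Decidable (Pre_separar_por_dias datos) := by
  unfold Pre_separar_por_dias; infer_instance

def pvWitness_separar_por_dias : (List (List (String × Int))) :=
  [[("hora", 1)], [("hora", 2)], [("hora", 0)]]

def Spec_separar_por_dias (datos : List (List (String × Int))) (out : List (List (List (String × Int)))) : Prop := out = separar_por_dias_alt datos
instance (datos : List (List (String × Int))) (out : List (List (List (String × Int)))) : Decidable (Spec_separar_por_dias datos out) := by unfold Spec_separar_por_dias; infer_instance

-- ===== CLAIM (what is proved, stated in full; the proofs are below) =====
def Claim_equal_separar_por_dias : Prop := ∀ (datos : List (List (String × Int))), Dom_separar_por_dias datos → Pre_separar_por_dias datos → Spec_separar_por_dias datos (separar_por_dias datos)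

-- ===== LEMMAS AND PROOFS =====

-- the partition of xs continuing the open day `cur` whose last hour is `prev`
def pvGlue (cur : List (List (String × Int))) (prev : Int) :
    List (List (String × Int)) → List (List (List (String × Int)))
  | [] => [cur]
  | x :: xs =>
      if pvHora x < prev then cur :: pvGlue [x] (pvHora x) xs
      else pvGlue (cur ++ [x]) (pvHora x) xs

theorem pvGlue_cons (xs : List (List (String × Int))) :
    ∀ cur prev a g rest, pvGlue cur prev xs = g :: rest →
      pvGlue (a :: cur) prev xs = (a :: g) :: rest := by
  induction xs with
  | nil =>
    intro cur prev a g rest h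
    simp [pvGlue] at h ⊢
    exact ⟨h.1 ▸ rfl, h.2⟩
  | cons x xs ih =>
    intro cur prev a g rest h
    by_cases hx : pvHora x < prev
    · simp [pvGlue, hx] at h ⊢
      exact ⟨h.1 ▸ rfl, h.2⟩
    · simp only [pvGlue, if_neg hx] at h ⊢
      have := ih (cur ++ [x]) (pvHora x) a g rest h
      simpa using this

theorem pvGlue_head (xs : List (List (String × Int))) :
    ∀ cur prev, ∃ t rest, pvGlue cur prev xs = (cur ++ t) :: rest := by
  induction xs with
  | nil => intro cur prev; exact ⟨[], [], by simp [pvGlue]⟩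
  | cons x xs ih =>
    intro cur prev
    by_cases hx : pvHora x < prev
    · exact ⟨[], pvGlue [x] (pvHora x) xs, by simp [pvGlue, hx]⟩
    · obtain ⟨t, rest, h⟩ := ih (cur ++ [x]) (pvHora x)
      exact ⟨[x] ++ t, rest, by simp only [pvGlue, if_neg hx, h, List.append_assoc]⟩

theorem pvFoldA (xs : List (List (String × Int))) :
    ∀ dias cur prev, cur ≠ [] →
      (let st := xs.foldl pvStepA (dias, cur, prev);
       if st.2.1 = [] then st.1 else st.1 ++ [st.2.1]) = dias ++ pvGlue cur prev xs := by
  induction xs with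
  | nil =>
    intro dias cur prev hcur
    simp [pvGlue, if_neg hcur]
  | cons x xs ih =>
    intro dias cur prev hcur
    by_cases hx : pvHora x < prev
    · simp only [List.foldl_cons, pvStepA, if_pos hx]
      have := ih (dias ++ [cur]) [x] (pvHora x) (by simp)
      simp only [this, pvGlue, if_pos hx, List.append_assoc, List.singleton_append]
    · simp only [List.foldl_cons, pvStepA, if_neg hx]
      have := ih dias (cur ++ [x]) (pvHora x) (by simp)
      simp only [this, pvGlue, if_neg hx]

theorem pvFoldB (xs : List (List (String × Int))) :
    ∀ x, List.foldr (fun fila dias => pvStepB dias fila) [] (x :: xs) =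
      pvGlue [x] (pvHora x) xs := by
  induction xs with
  | nil => intro x; simp [pvStepB, pvGlue]
  | cons y ys ih =>
    intro x
    have hy := ih y
    obtain ⟨t, rest, hhead⟩ := pvGlue_head ys [y] (pvHora y)
    have hfold : List.foldr (fun fila dias => pvStepB dias fila) [] (x :: y :: ys) =
        pvStepB (pvGlue [y] (pvHora y) ys) x := by
      simp only [List.foldr_cons] at hy ⊢
      rw [hy]
    rw [hfold, hhead]
    by_cases hx : pvHora y < pvHora x
    · have hle : ¬ pvHora x ≤ pvHora ((PySem.List.pyGet? ([y] ++ t) 0).getD []) := by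
        simpa [PySem.List.pyGet?_zero_cons] using not_le.mpr hx
      simp only [pvStepB, if_neg hle, pvGlue, if_pos hx, hhead]
    · have hle : pvHora x ≤ pvHora ((PySem.List.pyGet? ([y] ++ t) 0).getD []) := by
        simpa [PySem.List.pyGet?_zero_cons] using not_lt.mp hx
      simp only [pvStepB, if_pos hle]
      have := pvGlue_cons ys [y] (pvHora y) x ([y] ++ t) rest hhead
      simp only [pvGlue, if_neg hx, List.singleton_append]
      simpa using this.symm

theorem pv_main (datos : List (List (String × Int))) :
    separar_por_dias datos = separar_por_dias_alt datos := by
  cases datos with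
  | nil => rfl
  | cons d ds =>
    have hA : separar_por_dias (d :: ds) = [] ++ pvGlue [d] (pvHora d) ds := by
      have h0 : pvStepA ([], [], pvHora ((PySem.List.pyGet? (d :: ds) 0).getD [])) d
          = ([], [d], pvHora d) := by
        simp [pvStepA]
      simp only [separar_por_dias, List.foldl_cons, h0]
      exact pvFoldA ds [] [d] (pvHora d) (by simp)
    have hB : separar_por_dias_alt (d :: ds) = pvGlue [d] (pvHora d) ds := by
      simp only [separar_por_dias_alt, List.foldl_reverse]
      exact pvFoldB ds d
    rw [hA, hB, List.nil_append]

-- ===== VERDICT (by name: the statement is the Claim_ definition above) =====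
theorem separar_por_dias_spec : Claim_equal_separar_por_dias := by
  intro datos _ _
  exact pv_main datos
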